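-- pv_equiv track=rewrite | github.com/ifeanyi-okafor/email-memory-agent | memory/dedup.py | _merge_key_interactions
-- ===== SOURCE A (Python) =====
-- def _extract_dated_entries(ki_content: str) -> dict[str, str]:
--     """
--     Extract dated sub-entries from Key Interactions content.
--
--     Key Interactions sections contain ### YYYY-MM-DD sub-headings with
--     bullet points underneath. Returns {date_string: full_entry_text}.
--     """
--     entries: dict[str, str] = {}
--     current_date = None
--     current_lines: list[str] = []
--
--     for line in ki_content.split('\n'):
--         if line.startswith('### '):
--             # Save previous entry
--             if current_date:
--                 entries[current_date] = '\n'.join(current_lines).strip()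
--             current_date = line.strip()
--             current_lines = [line]
--         elif current_date:
--             current_lines.append(line)
--         # Lines before any ### date are ignored (shouldn't exist in well-formed files)
--
--     # Save last entry
--     if current_date:
--         entries[current_date] = '\n'.join(current_lines).strip()
--
--     return entries
--
-- def _merge_key_interactions(existing_ki: str, new_ki: str) -> str:
--     """
--     Merge Key Interactions by appending only new dated entries.
--
--     Each entry is a ### YYYY-MM-DD sub-heading with bullets.
--     If a date already exists in existing, skip it (no duplication).
--     """
--     if not new_ki.strip():
--         return existing_ki
--
--     existing_entries = _extract_dated_entries(existing_ki)
--     new_entries = _extract_dated_entries(new_ki)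
--
--     # Start with existing content
--     result = existing_ki.rstrip() if existing_ki.strip() else ''
--
--     # Append only dates not already present
--     for date_heading, entry_text in new_entries.items():
--         if date_heading not in existing_entries:
--             if result:
--                 result += '\n\n' + entry_text
--             else:
--                 result = entry_text
--
--     return result
-- ===== SOURCE B (Python) =====
-- def _merge_key_interactions(existing_ki: str, new_ki: str) -> str:
--     """Merge Key Interactions: index heading positions, slice blocks, join once."""
--     if not new_ki.strip():
--         return existing_ki
--
--     existing_dates = {l.strip() for l in existing_ki.split('\n') if l.startswith('### ')}
--
--     lines = new_ki.split('\n')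
--     idxs = [i for i, l in enumerate(lines) if l.startswith('### ')]
--     bounds = zip(idxs, idxs[1:] + [len(lines)])
--     new_entries = {lines[i].strip(): '\n'.join(lines[i:j]).strip() for i, j in bounds}
--
--     parts = [existing_ki.rstrip()] if existing_ki.strip() else []
--     parts += [text for date, text in new_entries.items() if date not in existing_dates]
--     return '\n\n'.join(parts)
-- ===== Notes on version B (the rewrite author's own statement) =====
-- stated objective: alternative
-- what changed: Replaces A's line-by-line state machine (mutable current_date/current_lines accumulator plus a string that is grown entry by entry) with an index-and-slice decomposition: heading positions are collected once, each dated block is a slice between consecutive headings, the existing dates are a set built in one comprehension, and the result is a single '\n\n'.join over the kept parts.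
import Mathlib
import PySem

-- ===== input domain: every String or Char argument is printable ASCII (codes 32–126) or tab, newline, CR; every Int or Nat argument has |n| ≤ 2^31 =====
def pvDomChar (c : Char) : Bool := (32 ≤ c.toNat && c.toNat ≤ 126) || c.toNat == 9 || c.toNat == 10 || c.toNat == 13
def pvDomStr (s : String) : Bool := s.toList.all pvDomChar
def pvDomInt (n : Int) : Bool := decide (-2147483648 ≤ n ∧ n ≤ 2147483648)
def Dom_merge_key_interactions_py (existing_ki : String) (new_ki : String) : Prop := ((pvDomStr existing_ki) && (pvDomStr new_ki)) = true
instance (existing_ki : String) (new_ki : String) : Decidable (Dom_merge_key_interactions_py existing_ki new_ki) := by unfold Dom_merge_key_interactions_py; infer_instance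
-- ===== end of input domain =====

-- B re-implements the merge by indexing heading positions and slicing blocks in one
-- comprehension pass (then a single join), instead of A's line-by-line state machine
-- with a mutable accumulator; same complexity, different decomposition ("alternative").

-- ===== PORT A =====
-- state: (entries, current_date, current_lines); Python truthiness of current_date
-- is 'some h with h ≠ ""' (literal port of 'if current_date:')
def pvExtractStep (st : PySem.Dict String String × Option String × List String)
    (line : String) : PySem.Dict String String × Option String × List String :=
  match st with
  | (entries, cur, acc) =>
    if PySem.Str.startswith line "### " then
      let entries' :=
        match cur with
        | some h => if h = "" then entries
                    else entries.insert h (PySem.Str.strip (PySem.Str.join "\n" acc))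
        | none => entries
      (entries', some (PySem.Str.strip line), [line])
    else
      match cur with
      | some h => if h = "" then (entries, cur, acc) else (entries, cur, acc ++ [line])
      | none => (entries, cur, acc)

def pvExtractDatedEntries (ki_content : String) : PySem.Dict String String :=
  let st := ((PySem.Str.split? ki_content "\n").getD []).foldl pvExtractStep
              (PySem.Dict.empty, none, [])
  match st.2.1 with
  | some h => if h = "" then st.1
              else st.1.insert h (PySem.Str.strip (PySem.Str.join "\n" st.2.2))
  | none => st.1

def merge_key_interactions_py (existing_ki : String) (new_ki : String) : String :=
  if PySem.Str.strip new_ki = "" then existing_ki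
  else
    let existing_entries := pvExtractDatedEntries existing_ki
    let new_entries := pvExtractDatedEntries new_ki
    let result := if PySem.Str.strip existing_ki ≠ "" then PySem.Str.rstrip existing_ki else ""
    new_entries.items.foldl
      (fun result p =>
        if existing_entries.contains p.1 then result
        else if result ≠ "" then result ++ "\n\n" ++ p.2 else p.2)
      result

-- ===== PORT B =====
def merge_key_interactions_py_alt (existing_ki : String) (new_ki : String) : String :=
  if PySem.Str.strip new_ki = "" then existing_ki
  else
    let existing_dates : PySem.Set String :=
      PySem.Set.ofList
        ((((PySem.Str.split? existing_ki "\n").getD []).filter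
            (fun l => PySem.Str.startswith l "### ")).map PySem.Str.strip)
    let lines := (PySem.Str.split? new_ki "\n").getD []
    let idxs := ((PySem.List.enumerate lines 0).filter
        (fun p => PySem.Str.startswith p.2 "### ")).map (fun p => p.1)
    let bounds := idxs.zip (idxs.drop 1 ++ [(lines.length : Int)])
    let new_entries := bounds.foldl
      (fun (d : PySem.Dict String String) p =>
        d.insert (PySem.Str.strip (PySem.List.pyGetD lines p.1 ""))
          (PySem.Str.strip (PySem.Str.join "\n" (PySem.List.slice lines (some p.1) (some p.2)))))
      PySem.Dict.empty
    let parts :=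
      (if PySem.Str.strip existing_ki ≠ "" then [PySem.Str.rstrip existing_ki] else []) ++
        (new_entries.items.filter (fun p => !(PySem.Set.contains existing_dates p.1))).map
          (fun p => p.2)
    PySem.Str.join "\n\n" parts

-- ===== PRECONDITION & SPEC =====
def Spec_merge_key_interactions_py (existing_ki : String) (new_ki : String) (out : String) : Prop :=
  out = merge_key_interactions_py_alt existing_ki new_ki
instance (existing_ki : String) (new_ki : String) (out : String) :
    Decidable (Spec_merge_key_interactions_py existing_ki new_ki out) := by
  unfold Spec_merge_key_interactions_py; infer_instance

-- ===== CLAIM =====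
def Claim_equal_merge_key_interactions_py : Prop :=
  ∀ (existing_ki : String) (new_ki : String), Dom_merge_key_interactions_py existing_ki new_ki →
    Spec_merge_key_interactions_py existing_ki new_ki (merge_key_interactions_py existing_ki new_ki)

-- ===== LEMMAS AND PROOFS =====

-- one bullet-block of a Key-Interactions text: a '### ' heading line plus the following
-- non-heading lines; both programs' dictionaries are the fold of pvBins over these blocks
def pvBlocks : List String → List (List String)
  | [] => []
  | l :: ls =>
    if PySem.Str.startswith l "### " then
      (l :: ls.takeWhile (fun x => !PySem.Str.startswith x "### ")) ::
        pvBlocks (ls.dropWhile (fun x => !PySem.Str.startswith x "### "))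
    else pvBlocks ls
  termination_by ls => ls.length
  decreasing_by
    · have := List.length_dropWhile_le (fun x => !PySem.Str.startswith x "### ") ls
      simp only [List.length_cons]; omega
    · simp only [List.length_cons]; omega

def pvBins (d : PySem.Dict String String) (b : List String) : PySem.Dict String String :=
  d.insert (PySem.Str.strip (b.headD "")) (PySem.Str.strip (PySem.Str.join "\n" b))

def pvFinalize (st : PySem.Dict String String × Option String × List String) :
    PySem.Dict String String :=
  match st.2.1 with
  | some h => if h = "" then st.1
              else st.1.insert h (PySem.Str.strip (PySem.Str.join "\n" st.2.2))
  | none => st.1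

def pvIdxs (s : Int) (ls : List String) : List Int :=
  ((PySem.List.enumerate ls s).filter (fun p => PySem.Str.startswith p.2 "### ")).map
    (fun p => p.1)

theorem pv_strip_eq_empty (s : String) (h : ∀ c ∈ s.toList, PySem.Chars.isspace c = true) :
    PySem.Str.strip s = "" := by
  apply String.toList_inj.mp
  simp only [PySem.Str.toList_strip, PySem.Chars.strip, PySem.Chars.rstrip, PySem.Chars.lstrip]
  rw [List.dropWhile_eq_nil_iff.mpr h]
  simp

theorem pv_strip_ne_of_mem (s : String) (c : Char) (hc : c ∈ s.toList)
    (hns : PySem.Chars.isspace c = false) : PySem.Str.strip s ≠ "" := by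
  intro he
  have h2 : (PySem.Str.strip s).toList = [] := by rw [he]; simp
  rw [PySem.Str.toList_strip, PySem.Chars.strip, PySem.Chars.rstrip, PySem.Chars.lstrip] at h2
  rw [List.reverse_eq_nil_iff, List.dropWhile_eq_nil_iff] at h2
  have hall : ∀ x ∈ List.dropWhile PySem.Chars.isspace s.toList, PySem.Chars.isspace x = true := by
    intro x hx
    exact h2 x (List.mem_reverse.mpr hx)
  have : PySem.Chars.isspace c = true := by
    rcases (List.mem_append.mp (by rw [List.takeWhile_append_dropWhile]; exact hc :
        c ∈ List.takeWhile PySem.Chars.isspace s.toList ++ List.dropWhile PySem.Chars.isspace s.toList)) with h1 | h1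
    · exact List.mem_takeWhile_imp h1
    · exact hall c h1
  simp [this] at hns

theorem pv_rstrip_ne (s : String) (h : PySem.Str.strip s ≠ "") : PySem.Str.rstrip s ≠ "" := by
  intro he
  apply h
  apply pv_strip_eq_empty
  intro c hc
  have h2 : (PySem.Str.rstrip s).toList = [] := by rw [he]; simp
  rw [PySem.Str.toList_rstrip, PySem.Chars.rstrip, List.reverse_eq_nil_iff,
    List.dropWhile_eq_nil_iff] at h2
  exact h2 c (List.mem_reverse.mpr hc)

theorem pv_heading_mem_hash (l : String) (h : PySem.Str.startswith l "### " = true) :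
    '#' ∈ l.toList := by
  rw [PySem.Str.startswith_eq, PySem.Chars.startswith_iff] at h
  exact h.mem (by simp)

theorem pv_strip_heading_ne (l : String) (h : PySem.Str.startswith l "### " = true) :
    PySem.Str.strip l ≠ "" :=
  pv_strip_ne_of_mem l '#' (pv_heading_mem_hash l h) (by decide)

theorem pv_strip_join_block_ne (l : String) (pre : List String)
    (h : PySem.Str.startswith l "### " = true) :
    PySem.Str.strip (PySem.Str.join "\n" (l :: pre)) ≠ "" := by
  apply pv_strip_ne_of_mem _ '#' _ (by decide)
  rw [PySem.Str.toList_join]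
  have hm := pv_heading_mem_hash l h
  cases pre with
  | nil => simpa [PySem.Chars.join_singleton] using hm
  | cons q rest =>
    simp only [List.map_cons, PySem.Chars.join_cons_cons]
    simp [hm]

theorem pv_acc_loop (pre : List String)
    (hpre : ∀ x ∈ pre, PySem.Str.startswith x "### " = false) :
    ∀ (d : PySem.Dict String String) (h : String) (acc : List String), h ≠ "" →
      pre.foldl pvExtractStep (d, some h, acc) = (d, some h, acc ++ pre) := by
  induction pre with
  | nil => intro d h acc _; simp
  | cons x xs ih =>
    intro d h acc hne
    have hx : PySem.Chars.startswith x.toList ['#', '#', '#', ' '] = false := by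
      simpa using hpre x (by simp)
    simp only [List.foldl_cons]
    rw [show pvExtractStep (d, some h, acc) x = (d, some h, acc ++ [x]) by
      simp [pvExtractStep, hx, hne]]
    rw [ih (fun y hy => hpre y (by simp [hy])) d h (acc ++ [x]) hne]
    simp

theorem pv_extract_eq_blocks (n : Nat) : ∀ (ls : List String), ls.length ≤ n →
    ∀ (d : PySem.Dict String String),
    pvFinalize (ls.foldl pvExtractStep (d, none, [])) = (pvBlocks ls).foldl pvBins d := by
  induction n with
  | zero =>
    intro ls hls d
    have : ls = [] := List.eq_nil_of_length_eq_zero (Nat.le_zero.mp hls)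
    subst this; simp [pvFinalize, pvBlocks]
  | succ n ih =>
    intro ls hls d
    cases ls with
    | nil => simp [pvFinalize, pvBlocks]
    | cons l ls' =>
      have hlen' : ls'.length ≤ n := by simp only [List.length_cons] at hls; omega
      by_cases hl : PySem.Str.startswith l "### " = true
      · -- heading line
        have hl' : PySem.Chars.startswith l.toList ['#', '#', '#', ' '] = true := by
          simpa using hl
        have hstrip := pv_strip_heading_ne l hl
        set p : String → Bool := fun x => !PySem.Str.startswith x "### " with hp
        have hsplit : ls' = ls'.takeWhile p ++ ls'.dropWhile p := (List.takeWhile_append_dropWhile).symm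
        have hpre : ∀ x ∈ ls'.takeWhile p, PySem.Str.startswith x "### " = false := by
          intro x hx
          have := List.mem_takeWhile_imp hx
          simp [hp] at this; exact this
        have hstep1 : pvExtractStep (d, none, []) l = (d, some (PySem.Str.strip l), [l]) := by
          simp [pvExtractStep, hl']
        have hb : pvBlocks (l :: ls') =
            (l :: ls'.takeWhile p) :: pvBlocks (ls'.dropWhile p) := by
          rw [pvBlocks]; simp [hl', hp]
        simp only [List.foldl_cons, hstep1, hb]
        conv_lhs => rw [hsplit]
        rw [List.foldl_append, pv_acc_loop _ hpre d _ [l] hstrip]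
        cases hrest : ls'.dropWhile p with
        | nil =>
          simp [pvFinalize, pvBins, pvBlocks, hstrip]
        | cons r rest' =>
          have hr' : PySem.Chars.startswith r.toList ['#', '#', '#', ' '] = true := by
            have hne : ls'.dropWhile p ≠ [] := by rw [hrest]; simp
            have := List.head_dropWhile_not p (l := ls') hne
            have h2 : (List.dropWhile p ls').head hne = r := by
              simp only [hrest, List.head_cons]
            rw [h2, hp] at this
            simpa using this
          have hstep2 : pvExtractStep (d, some (PySem.Str.strip l), [l] ++ ls'.takeWhile p) r =
              (pvBins d (l :: ls'.takeWhile p), some (PySem.Str.strip r), [r]) := by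
            simp [pvExtractStep, hr', hstrip, pvBins]
          simp only [List.foldl_cons, hstep2]
          have hlen2 : (r :: rest').length ≤ n := by
            have h1 := List.length_dropWhile_le p ls'
            rw [hrest] at h1
            omega
          have key := ih (r :: rest') hlen2 (pvBins d (l :: ls'.takeWhile p))
          have hstep3 : pvExtractStep (pvBins d (l :: ls'.takeWhile p), none, []) r =
              (pvBins d (l :: ls'.takeWhile p), some (PySem.Str.strip r), [r]) := by
            simp [pvExtractStep, hr']
          simp only [List.foldl_cons, hstep3] at key
          exact key
      · -- non-heading line: state (d, none, []) unchanged
        have hl' : PySem.Chars.startswith l.toList ['#', '#', '#', ' '] = false := by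
          have := Bool.not_eq_true _ ▸ hl
          simpa using Bool.eq_false_iff.mpr (by simpa using hl)
        have hstep : pvExtractStep (d, none, []) l = (d, none, []) := by
          simp [pvExtractStep, hl']
        have hb : pvBlocks (l :: ls') = pvBlocks ls' := by rw [pvBlocks]; simp [hl']
        simp only [List.foldl_cons, hstep, hb]
        exact ih ls' hlen' d

theorem pvIdxs_nil (s : Int) : pvIdxs s [] = [] := rfl

theorem pvIdxs_cons (s : Int) (l : String) (ls : List String) :
    pvIdxs s (l :: ls) =
      (if PySem.Str.startswith l "### " then [s] else []) ++ pvIdxs (s + 1) ls := by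
  simp only [pvIdxs, PySem.List.enumerate_cons, List.filter_cons]
  cases h : PySem.Str.startswith l "### " <;> simp_all

theorem pvIdxs_append (s : Int) (xs ys : List String) :
    pvIdxs s (xs ++ ys) = pvIdxs s xs ++ pvIdxs (s + xs.length) ys := by
  simp [pvIdxs, PySem.List.enumerate_append, List.filter_append]

theorem pvIdxs_eq_nil (s : Int) (xs : List String)
    (h : ∀ x ∈ xs, PySem.Str.startswith x "### " = false) : pvIdxs s xs = [] := by
  simp only [pvIdxs, List.map_eq_nil_iff, List.filter_eq_nil_iff]
  intro p hp
  have hmem : p.2 ∈ xs := by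
    rcases (PySem.List.mem_enumerate_iff _ _ _).mp hp with ⟨k, hk, rfl⟩
    simp
  simpa using h p.2 hmem

theorem pv_getD_front (front rest : List String) (i : Nat) :
    PySem.List.pyGetD (front ++ rest) (((front.length + i : Nat) : Int)) "" =
      PySem.List.pyGetD rest ((i : Nat) : Int) "" := by
  rw [PySem.List.pyGetD_natCast, PySem.List.pyGetD_natCast]
  simp only [List.getD]
  rw [List.getElem?_append_right (by omega)]
  simp

theorem pv_slice_front (front rest : List String) (i j : Nat) :
    PySem.List.slice (front ++ rest) (some ((front.length + i : Nat) : Int))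
        (some ((front.length + j : Nat) : Int)) =
      PySem.List.slice rest (some ((i : Nat) : Int)) (some ((j : Nat) : Int)) := by
  rw [PySem.List.slice_natCast, PySem.List.slice_natCast]
  rw [List.drop_length_add_append]
  congr 1
  omega

theorem pv_pairs_eq_blocks (n : Nat) : ∀ (ls front : List String) (o : Nat),
    o = front.length → ls.length ≤ n →
    ((pvIdxs (o : Int) ls).zip
        ((pvIdxs (o : Int) ls).drop 1 ++ [((o + ls.length : Nat) : Int)])).map
      (fun p => (PySem.List.pyGetD (front ++ ls) p.1 "",
                 PySem.List.slice (front ++ ls) (some p.1) (some p.2)))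
    = (pvBlocks ls).map (fun b => (b.headD "", b)) := by
  induction n with
  | zero =>
    intro ls front o ho hls
    have : ls = [] := List.eq_nil_of_length_eq_zero (Nat.le_zero.mp hls)
    subst this; simp [pvIdxs_nil, pvBlocks]
  | succ n ih =>
    intro ls front o ho hls
    cases ls with
    | nil => simp [pvIdxs_nil, pvBlocks]
    | cons l ls' =>
      have hlen' : ls'.length ≤ n := by simp only [List.length_cons] at hls; omega
      by_cases hl : PySem.Str.startswith l "### " = true
      · have hl' : PySem.Chars.startswith l.toList ['#', '#', '#', ' '] = true := by
          simpa using hl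
        set p : String → Bool := fun x => !PySem.Str.startswith x "### " with hp
        have hsplit : ls' = ls'.takeWhile p ++ ls'.dropWhile p :=
          (List.takeWhile_append_dropWhile).symm
        set pre := ls'.takeWhile p with hpredef
        set rest := ls'.dropWhile p with hrestdef
        have hpre : ∀ x ∈ pre, PySem.Str.startswith x "### " = false := by
          intro x hx
          have := List.mem_takeWhile_imp hx
          simp [hp] at this; exact this
        have hb : pvBlocks (l :: ls') = (l :: pre) :: pvBlocks rest := by
          rw [pvBlocks]; simp [hl', hp, hpredef, hrestdef]
        have hidx : pvIdxs (o : Int) (l :: ls') =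
            (o : Int) :: pvIdxs (((o + 1 + pre.length : Nat) : Int)) rest := by
          rw [pvIdxs_cons, if_pos hl]
          conv_lhs => rw [hsplit]
          rw [pvIdxs_append, pvIdxs_eq_nil _ _ hpre]
          rw [show ((o : Int) + 1 + (pre.length : Int)) = ((o + 1 + pre.length : Nat) : Int) by
            push_cast; ring]
          simp
        rw [hb, hidx]
        set o' : Nat := o + 1 + pre.length with ho'
        have hlsum : ls'.length = pre.length + rest.length := by
          conv_lhs => rw [hsplit]; simp
        have hsent : ((o + (l :: ls').length : Nat) : Int) = ((o' + rest.length : Nat) : Int) := by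
          simp only [List.length_cons]; congr 1; omega
        have hheadkey : PySem.List.pyGetD (front ++ l :: ls') ((o : Int)) "" = l := by
          have h0 : ((o : Nat) : Int) = ((front.length + 0 : Nat) : Int) := by simp [ho]
          rw [h0, pv_getD_front front (l :: ls') 0, PySem.List.pyGetD_natCast]
          simp
        have hheadslice : PySem.List.slice (front ++ l :: ls') (some ((o : Int)))
            (some ((o' : Nat) : Int)) = l :: pre := by
          have h0 : ((o : Nat) : Int) = ((front.length + 0 : Nat) : Int) := by simp [ho]
          have h1 : ((o' : Nat) : Int) = ((front.length + (1 + pre.length) : Nat) : Int) := by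
            congr 1; omega
          rw [h0, h1, pv_slice_front front (l :: ls') 0 (1 + pre.length),
            PySem.List.slice_natCast]
          simp only [Nat.sub_zero, List.drop_zero]
          rw [show 1 + pre.length = pre.length + 1 by omega, List.take_succ_cons]
          conv_lhs => rw [hsplit]
          rw [List.take_left]
        have hrlen : rest.length ≤ n := by
          have := List.length_dropWhile_le p ls'
          rw [← hrestdef] at this
          omega
        have hrhead : ∀ r rest', rest = r :: rest' → PySem.Str.startswith r "### " = true := by
          intro r rest' hr
          have hne : List.dropWhile p ls' ≠ [] := by rw [← hrestdef, hr]; simp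
          have hthis := List.head_dropWhile_not p (l := ls') hne
          have h1 : (List.dropWhile p ls').head? = some r := by rw [← hrestdef, hr]; rfl
          have h2 := List.head?_eq_some_head (l := List.dropWhile p ls') hne
          have h3 : (List.dropWhile p ls').head hne = r :=
            Option.some_injective _ (h2.symm.trans h1)
          rw [h3, hp] at hthis
          simpa using hthis
        have hfok : o' = (front ++ l :: pre).length := by
          simp [ho', ho]; omega
        clear_value pre rest o'
        cases hrest2 : rest with
        | nil =>
          subst hrest2
          rw [pvIdxs_nil]
          simp only [List.zip_cons_cons, List.drop_one, List.tail_cons, List.nil_append,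
            List.zip_nil_left, List.map_cons, List.map_nil]
          rw [show ((o + (l :: ls').length : Nat) : Int) = ((o' : Nat) : Int) by
            rw [hsent]; simp]
          rw [hheadkey, hheadslice]
          simp [pvBlocks]
        | cons r rest' =>
          subst hrest2
          have hr : PySem.Str.startswith r "### " = true := hrhead r rest' rfl
          have hconsidx : pvIdxs ((o' : Nat) : Int) (r :: rest') =
              ((o' : Nat) : Int) :: pvIdxs (((o' : Nat) : Int) + 1) rest' := by
            rw [pvIdxs_cons, if_pos hr, List.singleton_append]
          rw [hconsidx]
          simp only [List.drop_one, List.tail_cons, List.cons_append, List.zip_cons_cons,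
            List.map_cons]
          rw [hheadkey, hheadslice]
          have key := ih (r :: rest') (front ++ l :: pre) o' hfok
            (by simp only [List.length_cons] at hrlen ⊢; omega)
          rw [hconsidx] at key
          simp only [List.drop_one, List.tail_cons] at key
          rw [show (front ++ l :: pre) ++ r :: rest' = front ++ l :: ls' by
            rw [hsplit]; simp] at key
          rw [show ((o' + (r :: rest').length : Nat) : Int) =
              ((o + (l :: ls').length : Nat) : Int) by rw [hsent]] at key
          rw [key]
          simp
      · have hl' : PySem.Chars.startswith l.toList ['#', '#', '#', ' '] = false := by
          simpa using Bool.eq_false_iff.mpr (by simpa using hl)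
        have hb : pvBlocks (l :: ls') = pvBlocks ls' := by rw [pvBlocks]; simp [hl']
        have hidx : pvIdxs (o : Int) (l :: ls') = pvIdxs (((o + 1 : Nat) : Int)) ls' := by
          rw [pvIdxs_cons, if_neg (by simp [hl'])]
          simp only [List.nil_append]
          norm_cast
        rw [hb, hidx]
        have := ih ls' (front ++ [l]) (o + 1) (by simp [ho]) hlen'
        rw [show front ++ [l] ++ ls' = front ++ l :: ls' by simp] at this
        rw [show ((o + 1 + ls'.length : Nat) : Int) = ((o + (l :: ls').length : Nat) : Int) by
          simp only [List.length_cons]; congr 1; omega] at this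
        exact this

theorem pv_blocks_heads (n : Nat) : ∀ (ls : List String), ls.length ≤ n →
    (pvBlocks ls).map (fun b => b.headD "") =
      ls.filter (fun l => PySem.Str.startswith l "### ") := by
  induction n with
  | zero =>
    intro ls hls
    have : ls = [] := List.eq_nil_of_length_eq_zero (Nat.le_zero.mp hls)
    subst this; simp [pvBlocks]
  | succ n ih =>
    intro ls hls
    cases ls with
    | nil => simp [pvBlocks]
    | cons l ls' =>
      have hlen' : ls'.length ≤ n := by simp only [List.length_cons] at hls; omega
      by_cases hl : PySem.Str.startswith l "### " = true
      · have hl' : PySem.Chars.startswith l.toList ['#', '#', '#', ' '] = true := by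
          simpa using hl
        set p : String → Bool := fun x => !PySem.Str.startswith x "### " with hp
        have hsplit : ls' = ls'.takeWhile p ++ ls'.dropWhile p :=
          (List.takeWhile_append_dropWhile).symm
        have hb : pvBlocks (l :: ls') =
            (l :: ls'.takeWhile p) :: pvBlocks (ls'.dropWhile p) := by
          rw [pvBlocks]; simp [hl', hp]
        have hfpre : (ls'.takeWhile p).filter (fun l => PySem.Str.startswith l "### ") = [] := by
          rw [List.filter_eq_nil_iff]
          intro x hx
          have := List.mem_takeWhile_imp hx
          simp [hp] at this
          simpa using this
        have hrlen : (ls'.dropWhile p).length ≤ n := by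
          have := List.length_dropWhile_le p ls'
          omega
        rw [hb, List.map_cons, ih _ hrlen]
        rw [List.filter_cons_of_pos (by simpa using hl')]
        conv_rhs => rw [hsplit]
        rw [List.filter_append, hfpre]
        simp
      · have hl' : PySem.Chars.startswith l.toList ['#', '#', '#', ' '] = false := by
          simpa using Bool.eq_false_iff.mpr (by simpa using hl)
        have hb : pvBlocks (l :: ls') = pvBlocks ls' := by rw [pvBlocks]; simp [hl']
        rw [hb, List.filter_cons_of_neg (by simpa using hl')]
        exact ih _ hlen'

theorem pv_blocks_shape (n : Nat) : ∀ (ls : List String), ls.length ≤ n →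
    ∀ b ∈ pvBlocks ls, ∃ l pre, b = l :: pre ∧ PySem.Str.startswith l "### " = true := by
  induction n with
  | zero =>
    intro ls hls
    have : ls = [] := List.eq_nil_of_length_eq_zero (Nat.le_zero.mp hls)
    subst this; simp [pvBlocks]
  | succ n ih =>
    intro ls hls
    cases ls with
    | nil => simp [pvBlocks]
    | cons l ls' =>
      have hlen' : ls'.length ≤ n := by simp only [List.length_cons] at hls; omega
      by_cases hl : PySem.Str.startswith l "### " = true
      · have hl' : PySem.Chars.startswith l.toList ['#', '#', '#', ' '] = true := by
          simpa using hl
        set p : String → Bool := fun x => !PySem.Str.startswith x "### " with hp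
        have hb : pvBlocks (l :: ls') =
            (l :: ls'.takeWhile p) :: pvBlocks (ls'.dropWhile p) := by
          rw [pvBlocks]; simp [hl', hp]
        have hrlen : (ls'.dropWhile p).length ≤ n := by
          have := List.length_dropWhile_le p ls'
          omega
        rw [hb]
        intro b hb2
        rcases List.mem_cons.mp hb2 with h1 | h1
        · exact ⟨l, ls'.takeWhile p, h1, hl⟩
        · exact ih _ hrlen b h1
      · have hl' : PySem.Chars.startswith l.toList ['#', '#', '#', ' '] = false := by
          simpa using Bool.eq_false_iff.mpr (by simpa using hl)
        have hb : pvBlocks (l :: ls') = pvBlocks ls' := by rw [pvBlocks]; simp [hl']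
        rw [hb]
        exact ih _ hlen'

theorem pv_items_shape (bs : List (List String)) :
    ∀ (d : PySem.Dict String String) (q : String × String),
      q ∈ (bs.foldl pvBins d).items →
      q ∈ d.items ∨ ∃ b ∈ bs, q.2 = PySem.Str.strip (PySem.Str.join "\n" b) := by
  induction bs with
  | nil => intro d q hq; exact Or.inl hq
  | cons b bs ih =>
    intro d q hq
    rcases ih (pvBins d b) q hq with h1 | ⟨b', hb', h2⟩
    · unfold pvBins at h1
      rcases (PySem.Dict.mem_items_insert _ _ _ _).mp h1 with h2 | ⟨h2, _⟩
      · right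
        exact ⟨b, by simp, by rw [h2]⟩
      · exact Or.inl h2
    · right
      exact ⟨b', by simp [hb'], h2⟩

theorem pv_join_cons (sep a b : String) (rest : List String) :
    PySem.Str.join sep (a :: b :: rest) = a ++ sep ++ PySem.Str.join sep (b :: rest) := by
  apply String.toList_inj.mp
  simp only [PySem.Str.toList_join, List.map_cons, PySem.Chars.join_cons_cons,
    String.toList_append]

theorem pv_join_singleton (sep a : String) : PySem.Str.join sep [a] = a := by
  apply String.toList_inj.mp
  simp only [PySem.Str.toList_join, List.map_cons, List.map_nil, PySem.Chars.join_singleton]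

theorem pv_join_nil (sep : String) : PySem.Str.join sep [] = "" := by
  apply String.toList_inj.mp
  simp [PySem.Str.toList_join, PySem.Chars.join_nil]

theorem pv_append_ne (a b : String) (h : a ≠ "") : a ++ b ≠ "" := by
  intro he
  apply h
  apply String.toList_inj.mp
  have : (a ++ b).toList = [] := by rw [he]; simp
  rw [String.toList_append, List.append_eq_nil_iff] at this
  simp [this.1]

theorem pv_fold_join_pos (ts : List String) : ∀ (r0 : String), r0 ≠ "" →
    ts.foldl (fun r t => if r ≠ "" then r ++ "\n\n" ++ t else t) r0 =
      PySem.Str.join "\n\n" (r0 :: ts) := by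
  induction ts with
  | nil => intro r0 h; simp [pv_join_singleton]
  | cons t ts ih =>
    intro r0 h
    simp only [List.foldl_cons, if_pos h]
    rw [ih (r0 ++ "\n\n" ++ t) (pv_append_ne _ _ (pv_append_ne _ _ h))]
    rw [pv_join_cons]
    cases ts with
    | nil => rw [pv_join_singleton, pv_join_singleton]
    | cons u us => rw [pv_join_cons, pv_join_cons]; simp [String.append_assoc]

theorem pv_fold_join (ts : List String) (r0 : String) (hts : ∀ t ∈ ts, t ≠ "") :
    ts.foldl (fun r t => if r ≠ "" then r ++ "\n\n" ++ t else t) r0 =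
      PySem.Str.join "\n\n" ((if r0 ≠ "" then [r0] else []) ++ ts) := by
  by_cases h : r0 = ""
  · subst h
    rw [if_neg (by simp), List.nil_append]
    cases ts with
    | nil => simp [pv_join_nil]
    | cons t ts' =>
      have h1 : (List.foldl (fun r t => if r ≠ "" then r ++ "\n\n" ++ t else t) "" (t :: ts')) =
          (List.foldl (fun r t => if r ≠ "" then r ++ "\n\n" ++ t else t) t ts') := by
        simp
      rw [h1]
      exact pv_fold_join_pos ts' t (hts t (by simp))
  · rw [if_pos h, List.singleton_append]
    exact pv_fold_join_pos ts r0 h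

theorem pv_extract_eq (ki : String) :
    pvExtractDatedEntries ki =
      (pvBlocks ((PySem.Str.split? ki "\n").getD [])).foldl pvBins PySem.Dict.empty :=
  pv_extract_eq_blocks ((PySem.Str.split? ki "\n").getD []).length _ le_rfl _

theorem pv_alt_dict (lines : List String) :
    ((((PySem.List.enumerate lines 0).filter
          (fun p => PySem.Str.startswith p.2 "### ")).map (fun p => p.1)).zip
        ((((PySem.List.enumerate lines 0).filter
          (fun p => PySem.Str.startswith p.2 "### ")).map (fun p => p.1)).drop 1 ++
          [(lines.length : Int)])).foldl
      (fun (d : PySem.Dict String String) p =>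
        d.insert (PySem.Str.strip (PySem.List.pyGetD lines p.1 ""))
          (PySem.Str.strip (PySem.Str.join "\n" (PySem.List.slice lines (some p.1) (some p.2)))))
      PySem.Dict.empty
    = (pvBlocks lines).foldl pvBins PySem.Dict.empty := by
  have hp := pv_pairs_eq_blocks lines.length lines [] 0 rfl le_rfl
  simp only [List.nil_append, Nat.cast_zero, Nat.zero_add] at hp
  have h0 : pvIdxs 0 lines = ((PySem.List.enumerate lines 0).filter
      (fun p => PySem.Str.startswith p.2 "### ")).map (fun p => p.1) := rfl
  rw [h0] at hp
  rw [← List.foldl_map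
    (f := fun (p : Int × Int) => (PySem.List.pyGetD lines p.1 "",
        PySem.List.slice lines (some p.1) (some p.2)))
    (g := fun (d : PySem.Dict String String) (q : String × List String) =>
        d.insert (PySem.Str.strip q.1) (PySem.Str.strip (PySem.Str.join "\n" q.2)))]
  rw [hp]
  rw [List.foldl_map]
  rfl

theorem pv_contains_eq (lines : List String) (k : String) :
    ((pvBlocks lines).foldl pvBins PySem.Dict.empty).contains k =
      PySem.Set.contains
        (PySem.Set.ofList ((lines.filter (fun l => PySem.Str.startswith l "### ")).map
          PySem.Str.strip)) k := by
  rw [Bool.eq_iff_iff, PySem.Dict.contains_iff_mem_keys, PySem.Set.contains_iff,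
    PySem.Set.mem_ofList]
  have hkeys : ((pvBlocks lines).foldl pvBins PySem.Dict.empty).keys =
      PySem.Set.ofList ((pvBlocks lines).map (fun b => PySem.Str.strip (b.headD ""))) := by
    have := PySem.Dict.keys_foldl_insert_key (pvBlocks lines)
      (fun b => PySem.Str.strip (b.headD ""))
      (fun _ b => PySem.Str.strip (PySem.Str.join "\n" b)) PySem.Dict.empty
    rw [show (fun (d : PySem.Dict String String) (b : List String) =>
        d.insert (PySem.Str.strip (b.headD ""))
          (PySem.Str.strip (PySem.Str.join "\n" b))) = pvBins from rfl] at this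
    rw [this, PySem.Dict.keys_empty, PySem.Set.update_nil_left]
  rw [hkeys, PySem.Set.mem_ofList]
  rw [show ((pvBlocks lines).map (fun b => PySem.Str.strip (b.headD ""))) =
      (((pvBlocks lines).map (fun b => b.headD "")).map PySem.Str.strip) by
    rw [List.map_map]; rfl]
  rw [pv_blocks_heads lines.length lines le_rfl]

-- ===== VERDICT (by name: the statement is the Claim_ definition above) =====
theorem merge_key_interactions_py_spec : Claim_equal_merge_key_interactions_py := by
  intro e n _
  unfold Spec_merge_key_interactions_py
  simp only [merge_key_interactions_py, merge_key_interactions_py_alt]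
  by_cases hn : PySem.Str.strip n = ""
  · simp [hn]
  · rw [if_neg hn, if_neg hn]
    rw [pv_alt_dict, pv_extract_eq, pv_extract_eq]
    set lines_e := (PySem.Str.split? e "\n").getD [] with hle
    set lines_n := (PySem.Str.split? n "\n").getD [] with hln
    set dates := PySem.Set.ofList
      ((lines_e.filter (fun l => PySem.Str.startswith l "### ")).map PySem.Str.strip)
      with hdates
    set D := (pvBlocks lines_n).foldl pvBins PySem.Dict.empty with hD
    set r0 : String := if PySem.Str.strip e ≠ "" then PySem.Str.rstrip e else "" with hr0
    -- rewrite A's loop condition to B's set membership and flip the branch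
    have hcongr : D.items.foldl
        (fun result p =>
          if ((pvBlocks lines_e).foldl pvBins PySem.Dict.empty).contains p.1 = true then result
          else if result ≠ "" then result ++ "\n\n" ++ p.2 else p.2) r0 =
        D.items.foldl
          (fun result p =>
            if (!(PySem.Set.contains dates p.1)) = true then
              (if result ≠ "" then result ++ "\n\n" ++ p.2 else p.2)
            else result) r0 := by
      apply PySem.List.foldl_congr_mem
      intro acc p _
      rw [pv_contains_eq lines_e p.1, ← hdates]
      cases h : PySem.Set.contains dates p.1 <;> simp [h]
    rw [hcongr]
    rw [PySem.List.foldl_if_eq_foldl_filter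
      (p := fun (p : String × String) => !(PySem.Set.contains dates p.1))
      (f := fun result (p : String × String) =>
        if result ≠ "" then result ++ "\n\n" ++ p.2 else p.2)]
    rw [← List.foldl_map (f := fun (p : String × String) => p.2)
      (g := fun (result t : String) => if result ≠ "" then result ++ "\n\n" ++ t else t)]
    have hts : ∀ t ∈ (D.items.filter
        (fun p => !(PySem.Set.contains dates p.1))).map (fun p => p.2), t ≠ "" := by
      intro t ht
      rcases List.mem_map.mp ht with ⟨p, hp, rfl⟩
      have hpD : p ∈ D.items := (List.mem_filter.mp hp).1
      rcases pv_items_shape (pvBlocks lines_n) PySem.Dict.empty p (hD ▸ hpD) with h1 | ⟨b, hb, h2⟩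
      · simp [PySem.Dict.empty] at h1
      · rcases pv_blocks_shape lines_n.length lines_n le_rfl b hb with ⟨l, pre, rfl, hhead⟩
        rw [h2]
        exact pv_strip_join_block_ne l pre hhead
    rw [pv_fold_join _ r0 hts]
    have hpre : (if r0 ≠ "" then [r0] else []) =
        (if PySem.Str.strip e ≠ "" then [PySem.Str.rstrip e] else []) := by
      by_cases he : PySem.Str.strip e = ""
      · simp [hr0, he]
      · simp [hr0, he, pv_rstrip_ne e he]

    rw [hpre]
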